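-- pv_equiv track=rewrite | github.com/edu-ucsd-cse-231/fa12-schemec | schemec/genc.py | pretty_C
-- ===== SOURCE A (Python) =====
-- def pretty_C(code, nspace=2):
--     unindent = nspace // 2
--     # prettify code
--     pretty_code = code.splitlines()
--     indent = 0
--     for i, line in enumerate(pretty_code):
--         line = line.strip()
--         j = 0
--         if len(line) and line[0] == '}':
--             indent -= 1
--             j = 1
--         if ((len(line) > 4 and line[:5].lower() == 'case ') or
--             (len(line) > 7 and line[:7].lower() == 'default' and line[7] in (' ', ':'))):
--             prefix = ' ' * (nspace * indent - unindent)
--         else: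
--             prefix = ' ' * (nspace * indent)
--         pretty_code[i] = prefix + line
--         for char in line[j:]:
--             if char == '{':
--                 indent += 1
--             elif char == '}':
--                 indent -= 1
--     return '\n'.join(pretty_code)
-- ===== SOURCE B (Python) =====
-- def pretty_C(code, nspace=2):
--     unindent = nspace // 2
--     # Stateless analysis: strip each line and compute its full brace delta independently.
--     lines = [l.strip() for l in code.splitlines()]
--     deltas = [sum(1 for c in l if c == '{') - sum(1 for c in l if c == '}') for l in lines]
--     # Render: the indent of line i is a closed-form prefix sum of the earlier deltas,
--     # lowered by one when the line itself opens with '}'.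
--     out = []
--     for i, line in enumerate(lines):
--         indent = sum(deltas[:i]) - (1 if line.startswith('}') else 0)
--         is_label = ((len(line) > 4 and line[:5].lower() == 'case ') or
--                     (len(line) > 7 and line[:7].lower() == 'default' and line[7] in (' ', ':')))
--         out.append(' ' * (nspace * indent - (unindent if is_label else 0)) + line)
--     return '\n'.join(out)
-- ===== Notes on version B (the rewrite author's own statement) =====
-- stated objective: alternative
-- what changed: A threads one mutable brace counter through a single interleaved loop (decrement-before-print, then a char scan that updates it for the next line); B keeps no running counter at all: it computes each line's full brace delta independently by a stateless map and obtains each line's indent as a closed-form prefix sum of the earlier deltas (minus one when the line opens with '}'), then renders.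
import Mathlib
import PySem

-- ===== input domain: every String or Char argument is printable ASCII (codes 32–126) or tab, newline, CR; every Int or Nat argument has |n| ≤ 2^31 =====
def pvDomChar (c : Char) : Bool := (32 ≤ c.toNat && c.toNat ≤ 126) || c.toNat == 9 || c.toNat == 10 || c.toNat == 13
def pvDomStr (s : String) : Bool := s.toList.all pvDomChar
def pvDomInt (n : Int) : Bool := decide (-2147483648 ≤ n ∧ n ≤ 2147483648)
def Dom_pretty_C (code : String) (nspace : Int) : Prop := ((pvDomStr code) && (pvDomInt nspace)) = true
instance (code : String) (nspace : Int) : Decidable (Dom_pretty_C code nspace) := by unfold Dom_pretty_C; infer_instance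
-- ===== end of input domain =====

-- B replaces A's running brace counter with stateless per-line deltas and closed-form
-- prefix sums (objective: alternative decomposition, same return value).

-- ===== PORT A =====
-- one iteration of A's loop: state = (indent, output lines so far)
def pvAStep (nspace unindent : Int) (st : Int × List (List Char)) (raw : List Char) : Int × List (List Char) :=
  let line := PySem.Chars.strip raw
  let ij : Int × Int :=
    if 0 < line.length ∧ PySem.List.pyGet? line 0 = some '}' then (st.1 - 1, 1) else (st.1, 0)
  let pre : List Char :=
    if (4 < line.length ∧ PySem.Chars.lower (PySem.List.slice line none (some 5)) = "case ".toList)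
       ∨ (7 < line.length ∧ PySem.Chars.lower (PySem.List.slice line none (some 7)) = "default".toList
           ∧ (PySem.List.pyGet? line 7 = some ' ' ∨ PySem.List.pyGet? line 7 = some ':'))
    then PySem.List.pyRepeat [' '] (nspace * ij.1 - unindent)
    else PySem.List.pyRepeat [' '] (nspace * ij.1)
  let indent2 := (PySem.List.slice line (some ij.2) none).foldl
    (fun ind c => if c = '{' then ind + 1 else if c = '}' then ind - 1 else ind) ij.1
  (indent2, st.2 ++ [pre ++ line])

def pretty_C (code : String) (nspace : Int) : String :=
  let unindent := PySem.Int.floordiv nspace 2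
  let lines := (PySem.Str.splitlines code).map String.toList
  let res := lines.foldl (pvAStep nspace unindent) (0, [])
  String.ofList (PySem.Chars.join ['\n'] res.2)

-- ===== PORT B =====
-- stateless per-line brace delta: sum(1 for c in l if c=='{') - sum(1 for c in l if c=='}')
def pvDelta (l : List Char) : Int :=
  (l.map (fun c => if c = '{' then (1 : Int) else 0)).sum
    - (l.map (fun c => if c = '}' then (1 : Int) else 0)).sum

-- render of one enumerated line from the prefix sums of the deltas
def pvRenderB (nspace unindent : Int) (deltas : List Int) (p : Int × List Char) : List Char :=
  let line := p.2
  let indent : Int := (PySem.List.slice deltas none (some p.1)).sum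
                        - (if PySem.Chars.startswith line ['}'] then 1 else 0)
  let isLabel :=
    (4 < line.length ∧ PySem.Chars.lower (PySem.List.slice line none (some 5)) = "case ".toList)
       ∨ (7 < line.length ∧ PySem.Chars.lower (PySem.List.slice line none (some 7)) = "default".toList
           ∧ (PySem.List.pyGet? line 7 = some ' ' ∨ PySem.List.pyGet? line 7 = some ':'))
  PySem.List.pyRepeat [' '] (nspace * indent - (if isLabel then unindent else 0)) ++ line

def pretty_C_alt (code : String) (nspace : Int) : String :=
  let unindent := PySem.Int.floordiv nspace 2
  let lines := (PySem.Str.splitlines code).map (fun s => PySem.Chars.strip s.toList)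
  let deltas := lines.map pvDelta
  let out := (PySem.List.enumerate lines).map (pvRenderB nspace unindent deltas)
  String.ofList (PySem.Chars.join ['\n'] out)

-- ===== PRECONDITION & SPEC =====
def Spec_pretty_C (code : String) (nspace : Int) (out : String) : Prop := out = pretty_C_alt code nspace
instance (code : String) (nspace : Int) (out : String) : Decidable (Spec_pretty_C code nspace out) := by unfold Spec_pretty_C; infer_instance

-- ===== CLAIM =====
def Claim_equal_pretty_C : Prop := ∀ (code : String) (nspace : Int), Dom_pretty_C code nspace → Spec_pretty_C code nspace (pretty_C code nspace)

-- ===== LEMMAS AND PROOFS =====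
theorem pvFoldDelta (cs : List Char) (ind : Int) :
    cs.foldl (fun ind c => if c = '{' then ind + 1 else if c = '}' then ind - 1 else ind) ind
      = ind + pvDelta cs := by
  induction cs generalizing ind with
  | nil => simp [pvDelta]
  | cons c cs ih =>
      simp only [List.foldl_cons, ih, pvDelta, List.map_cons, List.sum_cons]
      by_cases h1 : c = '{'
      · simp [h1]; ring
      · by_cases h2 : c = '}'
        · simp [h2]; ring
        · simp [h1, h2]

theorem pvBrace (line : List Char) :
    (0 < line.length ∧ PySem.List.pyGet? line 0 = some '}') ↔ PySem.Chars.startswith line ['}'] = true := by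
  cases line with
  | nil => simp [PySem.Chars.startswith_iff]
  | cons c cs =>
      rw [PySem.Chars.startswith_iff, List.cons_prefix_cons]
      simp [eq_comm]

-- A's step on a stripped line, from indent `ind`, appends exactly B's render with
-- prefix-sum value `ind`, and leaves indent `ind + pvDelta line`.
theorem pvStep_eq (nspace unindent ind : Int) (acc : List (List Char)) (raw : List Char) :
    pvAStep nspace unindent (ind, acc) raw
      = (ind + pvDelta (PySem.Chars.strip raw),
         acc ++ [pvRenderB nspace unindent [ind] (1, PySem.Chars.strip raw)]) := by
  have hs1 : PySem.List.slice [ind] none (some 1) = [ind] := by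
    rw [show (1:Int) = ((1:Nat):Int) by norm_num, PySem.List.slice_to_natCast]; rfl
  simp only [pvAStep, pvRenderB, hs1, List.sum_cons, List.sum_nil, add_zero]
  by_cases hb : PySem.Chars.startswith (PySem.Chars.strip raw) ['}'] = true
  · rw [if_pos ((pvBrace _).mpr hb), if_pos hb]
    rcases (PySem.Chars.startswith_iff _ _).mp hb with ⟨t, ht⟩
    simp only [PySem.List.slice_from_one, pvFoldDelta, ← ht, List.cons_append, List.nil_append,
      Prod.mk.injEq, List.tail_cons, List.append_cancel_left_eq, List.cons.injEq, and_true]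
    refine ⟨by simp [pvDelta]; ring, ?_⟩
    split_ifs <;> simp
  · rw [if_neg (fun h => hb ((pvBrace _).mp h)), if_neg hb]
    have h0 : PySem.List.slice (PySem.Chars.strip raw) (some 0) none = PySem.Chars.strip raw := by
      simp [PySem.List.slice_zero_start, PySem.List.slice_none_none]
    simp only [h0, pvFoldDelta, Prod.mk.injEq, List.append_cancel_left_eq, List.cons.injEq, and_true]
    refine ⟨trivial, ?_⟩
    split_ifs <;> simp

-- proof helpers: render at an explicit base indent, and the whole render sequence
def pvR (nspace unindent b : Int) (l : List Char) : List Char :=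
  pvRenderB nspace unindent [b] (1, l)

def pvG (nspace unindent : Int) (st : Int × List (List Char)) (x : List Char) : Int × List (List Char) :=
  (st.1 + pvDelta x, st.2 ++ [pvR nspace unindent st.1 x])

def pvRenderAll (nspace unindent ind : Int) : List (List Char) → List (List Char)
  | [] => []
  | l :: t => pvR nspace unindent ind l :: pvRenderAll nspace unindent (ind + pvDelta l) t

theorem pvAStep_eq_G (nspace unindent : Int) (st : Int × List (List Char)) (raw : List Char) :
    pvAStep nspace unindent st raw = pvG nspace unindent st (PySem.Chars.strip raw) := by
  cases st with
  | mk i a => exact pvStep_eq nspace unindent i a raw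

theorem pvFoldG (nspace unindent : Int) (ls : List (List Char)) (ind : Int) (acc : List (List Char)) :
    (ls.foldl (pvG nspace unindent) (ind, acc)).2 = acc ++ pvRenderAll nspace unindent ind ls := by
  induction ls generalizing ind acc with
  | nil => simp [pvRenderAll]
  | cons l t ih =>
      simp only [List.foldl_cons, pvRenderAll]
      rw [show pvG nspace unindent (ind, acc) l
            = (ind + pvDelta l, acc ++ [pvR nspace unindent ind l]) from rfl, ih]
      simp

theorem pvRenderAll_length (nspace unindent ind : Int) (ls : List (List Char)) :
    (pvRenderAll nspace unindent ind ls).length = ls.length := by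
  induction ls generalizing ind with
  | nil => rfl
  | cons l t ih => simp [pvRenderAll, ih]

theorem pvRenderAll_get (nspace unindent : Int) (ls : List (List Char)) (ind : Int) (k : Nat)
    (h : k < ls.length) :
    (pvRenderAll nspace unindent ind ls)[k]'(by rw [pvRenderAll_length]; exact h)
      = pvR nspace unindent (ind + ((ls.map pvDelta).take k).sum) ls[k] := by
  induction ls generalizing ind k with
  | nil => simp at h
  | cons l t ih =>
      cases k with
      | zero => simp [pvRenderAll]
      | succ k =>
          simp only [pvRenderAll, List.getElem_cons_succ, List.map_cons, List.take_succ_cons,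
            List.sum_cons]
          rw [ih _ k (by simpa using h), add_assoc]

theorem pvRenderB_at (nspace unindent : Int) (ds : List Int) (k : Nat) (l : List Char) :
    pvRenderB nspace unindent ds ((k : Int), l) = pvR nspace unindent ((ds.take k).sum) l := by
  have h1 : PySem.List.slice [(ds.take k).sum] none (some 1) = [(ds.take k).sum] := by
    rw [show (1:Int) = ((1:Nat):Int) by norm_num, PySem.List.slice_to_natCast]; rfl
  simp [pvRenderB, pvR, PySem.List.slice_to_natCast, h1]

theorem pretty_C_spec : Claim_equal_pretty_C := by
  intro code nspace _
  simp only [Spec_pretty_C, pretty_C, pretty_C_alt]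
  set u := PySem.Int.floordiv nspace 2
  set ls := (PySem.Str.splitlines code).map (fun s => PySem.Chars.strip s.toList) with hls
  have hfold : ((PySem.Str.splitlines code).map String.toList).foldl (pvAStep nspace u) (0, [])
      = ls.foldl (pvG nspace u) (0, []) := by
    rw [hls, List.foldl_map, List.foldl_map]
    congr 1
    funext st s
    exact pvAStep_eq_G nspace u st s.toList
  rw [hfold, pvFoldG]
  have hlist : pvRenderAll nspace u 0 ls
      = (PySem.List.enumerate ls).map (pvRenderB nspace u (ls.map pvDelta)) := by
    apply List.ext_getElem
    · simp [pvRenderAll_length, PySem.List.length_enumerate]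
    · intro k h1 h2
      rw [pvRenderAll_get nspace u ls 0 k (by simpa [pvRenderAll_length] using h1)]
      simp only [List.getElem_map, PySem.List.getElem_enumerate]
      rw [show ((0:Int) + (k:Int), ls[k]'(by simpa [PySem.List.length_enumerate, List.getElem_map] using h2))
            = ((k:Int), ls[k]'(by simpa [PySem.List.length_enumerate, List.getElem_map] using h2)) by norm_num]
      rw [pvRenderB_at]
      norm_num
  rw [hlist]
  simp
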